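-- pv_equiv track=rewrite | github.com/Alittlebitofme/Crackers-Toolkit | crackers_toolkit/modules/mask_builder.py | _tokenize_mask
-- ===== SOURCE A (Python) =====
-- PLACEHOLDERS = {
--     "?l": ("a-z", 26),
--     "?u": ("A-Z", 26),
--     "?d": ("0-9", 10),
--     "?h": ("0-9 a-f", 16),
--     "?H": ("0-9 A-F", 16),
--     "?s": ("Special chars", 33),
--     "?a": ("All printable ASCII", 95),
--     "?b": ("All bytes 0x00-0xFF", 256),
--     "?1": ("Custom charset 1", 0),
--     "?2": ("Custom charset 2", 0),
--     "?3": ("Custom charset 3", 0),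
--     "?4": ("Custom charset 4", 0),
--     "?5": ("Custom charset 5", 0),
--     "?6": ("Custom charset 6", 0),
--     "?7": ("Custom charset 7", 0),
--     "?8": ("Custom charset 8", 0),
-- }
--
-- def _tokenize_mask(mask: str) -> list[str]:
--     """Split a mask string into tokens, grouping consecutive literal
--     characters into one token."""
--     tokens: list[str] = []
--     literal_buf = ""
--     i = 0
--     while i < len(mask):
--         if i + 1 < len(mask) and mask[i] == "?":
--             candidate = mask[i : i + 2]
--             if candidate in PLACEHOLDERS:
--                 if literal_buf:
--                     tokens.append(literal_buf)
--                     literal_buf = ""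
--                 tokens.append(candidate)
--                 i += 2
--                 continue
--         literal_buf += mask[i]
--         i += 1
--     if literal_buf:
--         tokens.append(literal_buf)
--     return tokens
-- ===== SOURCE B (Python) =====
-- import re
--
-- PLACEHOLDERS = {
--     "?l": ("a-z", 26),
--     "?u": ("A-Z", 26),
--     "?d": ("0-9", 10),
--     "?h": ("0-9 a-f", 16),
--     "?H": ("0-9 A-F", 16),
--     "?s": ("Special chars", 33),
--     "?a": ("All printable ASCII", 95),
--     "?b": ("All bytes 0x00-0xFF", 256),
--     "?1": ("Custom charset 1", 0),
--     "?2": ("Custom charset 2", 0),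
--     "?3": ("Custom charset 3", 0),
--     "?4": ("Custom charset 4", 0),
--     "?5": ("Custom charset 5", 0),
--     "?6": ("Custom charset 6", 0),
--     "?7": ("Custom charset 7", 0),
--     "?8": ("Custom charset 8", 0),
-- }
--
-- _TOKEN = re.compile(r"(\?[ludhHsab12345678])")
--
-- def _tokenize_mask(mask: str) -> list[str]:
--     """Split a mask string into tokens, grouping consecutive literal
--     characters into one token."""
--     return [p for p in _TOKEN.split(mask) if p]
-- ===== Notes on version B (the rewrite author's own statement) =====
-- stated objective: faster
-- what changed: Replaces the manual index/literal-buffer while-loop state machine (with quadratic literal_buf += c string accumulation) by a single compiled-regex split on the placeholder pattern (capture group keeps the placeholders) followed by filtering out empty parts.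
import Mathlib
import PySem

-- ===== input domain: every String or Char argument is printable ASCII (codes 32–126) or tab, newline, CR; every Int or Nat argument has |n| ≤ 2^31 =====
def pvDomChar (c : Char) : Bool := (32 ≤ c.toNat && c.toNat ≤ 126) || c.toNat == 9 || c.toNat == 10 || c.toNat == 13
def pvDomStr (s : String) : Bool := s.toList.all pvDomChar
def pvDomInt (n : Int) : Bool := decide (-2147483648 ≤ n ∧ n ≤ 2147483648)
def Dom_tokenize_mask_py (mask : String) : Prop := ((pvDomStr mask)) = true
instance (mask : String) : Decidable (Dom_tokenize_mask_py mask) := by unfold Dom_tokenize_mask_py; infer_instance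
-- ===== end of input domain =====

-- B replaces A's index/literal-buffer state machine by a regex split on the
-- placeholder pattern with empty parts filtered out (objective: faster; a timing run measured B faster).

-- ===== PORT A =====
-- the module-level PLACEHOLDERS dict (A uses only key membership)
def pvPlaceholders : PySem.Dict String (String × Int) := PySem.Dict.ofList
  [("?l", ("a-z", 26)), ("?u", ("A-Z", 26)), ("?d", ("0-9", 10)),
   ("?h", ("0-9 a-f", 16)), ("?H", ("0-9 A-F", 16)), ("?s", ("Special chars", 33)),
   ("?a", ("All printable ASCII", 95)), ("?b", ("All bytes 0x00-0xFF", 256)),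
   ("?1", ("Custom charset 1", 0)), ("?2", ("Custom charset 2", 0)),
   ("?3", ("Custom charset 3", 0)), ("?4", ("Custom charset 4", 0)),
   ("?5", ("Custom charset 5", 0)), ("?6", ("Custom charset 6", 0)),
   ("?7", ("Custom charset 7", 0)), ("?8", ("Custom charset 8", 0))]

-- A's while loop as recursion on the remaining characters; buf = literal_buf,
-- tokens are emitted in order (tokens.append = emit to the front of the rest)
def pvTokA (buf : List Char) : List Char → List String
  | c :: c2 :: rest' =>
    -- 'i + 1 < len(mask) and mask[i] == "?"', then 'candidate in PLACEHOLDERS'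
    if c = '?' ∧ pvPlaceholders.contains (String.ofList [c, c2]) then
      (if buf.isEmpty then [] else [String.ofList buf]) ++ String.ofList [c, c2] :: pvTokA [] rest'
    else
      pvTokA (buf ++ [c]) (c2 :: rest')
  | [c] => pvTokA (buf ++ [c]) []          -- last char is always a literal
  | [] => if buf.isEmpty then [] else [String.ofList buf]
termination_by l => l.length
decreasing_by all_goals (simp [List.length_cons]; try omega)

def tokenize_mask_py (mask : String) : List String := pvTokA [] mask.toList

-- ===== PORT B =====
-- the character class of the compiled regex r"(\?[ludhHsab12345678])"
def pvClassChar (c : Char) : Bool := c ∈ "ludhHsab12345678".toList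

-- hand port of _TOKEN.split(mask): leftmost non-overlapping matches of the
-- two-character pattern; emits the segments between matches and the captured
-- matches, in order (exact for this pattern: '?' + one class character)
def pvSplit (acc : List Char) : List Char → List String
  | c :: c2 :: rest =>
    if c = '?' ∧ pvClassChar c2 then
      String.ofList acc :: String.ofList [c, c2] :: pvSplit [] rest
    else
      pvSplit (acc ++ [c]) (c2 :: rest)
  | [c] => [String.ofList (acc ++ [c])]
  | [] => [String.ofList acc]

-- '[p for p in _TOKEN.split(mask) if p]'
def tokenize_mask_py_alt (mask : String) : List String :=
  (pvSplit [] mask.toList).filter (fun p => p ≠ "")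

-- ===== PRECONDITION & SPEC =====
def Spec_tokenize_mask_py (mask : String) (out : List String) : Prop := out = tokenize_mask_py_alt mask
instance (mask : String) (out : List String) : Decidable (Spec_tokenize_mask_py mask out) := by unfold Spec_tokenize_mask_py; infer_instance

-- ===== CLAIM (what is proved, stated in full; the proofs are below) =====
def Claim_equal_tokenize_mask_py : Prop := ∀ (mask : String), Dom_tokenize_mask_py mask → Spec_tokenize_mask_py mask (tokenize_mask_py mask)

-- ===== LEMMAS AND PROOFS =====

-- a two-character string key matches "?c2" exactly when c2 is its second character
lemma pv_key_beq (s : String) (a c2 : Char) (hs : s.toList = ['?', a]) :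
    (s == String.ofList ['?', c2]) = decide (c2 = a) := by
  have hto : (String.ofList ['?', c2]).toList = ['?', c2] := by simp
  rcases instDecidableEqChar c2 a with h | h
  · simp only [h, decide_false]
    rw [beq_eq_false_iff_ne]
    intro heq
    have := congrArg String.toList heq
    rw [hs, hto] at this
    injection this with _ h2
    injection h2 with h3 _
    exact h h3.symm
  · subst h
    simp only [decide_true]
    rw [beq_iff_eq, String.ext_iff, hs, hto]

-- membership of "?c2" among the PLACEHOLDERS keys is exactly the regex class
lemma pv_contains_eq_class (c2 : Char) :
    pvPlaceholders.contains (String.ofList ['?', c2]) = pvClassChar c2 := by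
  have h : pvPlaceholders.items =
    [("?l", ("a-z", 26)), ("?u", ("A-Z", 26)), ("?d", ("0-9", 10)),
     ("?h", ("0-9 a-f", 16)), ("?H", ("0-9 A-F", 16)), ("?s", ("Special chars", 33)),
     ("?a", ("All printable ASCII", 95)), ("?b", ("All bytes 0x00-0xFF", 256)),
     ("?1", ("Custom charset 1", 0)), ("?2", ("Custom charset 2", 0)),
     ("?3", ("Custom charset 3", 0)), ("?4", ("Custom charset 4", 0)),
     ("?5", ("Custom charset 5", 0)), ("?6", ("Custom charset 6", 0)),
     ("?7", ("Custom charset 7", 0)), ("?8", ("Custom charset 8", 0))] := by decide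
  simp [PySem.Dict.contains, h, pvClassChar,
        pv_key_beq "?l" 'l' c2 (by decide), pv_key_beq "?u" 'u' c2 (by decide),
        pv_key_beq "?d" 'd' c2 (by decide), pv_key_beq "?h" 'h' c2 (by decide),
        pv_key_beq "?H" 'H' c2 (by decide), pv_key_beq "?s" 's' c2 (by decide),
        pv_key_beq "?a" 'a' c2 (by decide), pv_key_beq "?b" 'b' c2 (by decide),
        pv_key_beq "?1" '1' c2 (by decide), pv_key_beq "?2" '2' c2 (by decide),
        pv_key_beq "?3" '3' c2 (by decide), pv_key_beq "?4" '4' c2 (by decide),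
        pv_key_beq "?5" '5' c2 (by decide), pv_key_beq "?6" '6' c2 (by decide),
        pv_key_beq "?7" '7' c2 (by decide), pv_key_beq "?8" '8' c2 (by decide)]

-- A's loop equals B's split followed by the empty filter, for every buffer
lemma pv_tokA_eq_filter_split (acc l : List Char) :
    pvTokA acc l = (pvSplit acc l).filter (fun p => p ≠ "") := by
  induction acc, l using pvSplit.induct with
  | case1 acc c c2 rest h ih =>
    obtain ⟨hc, hcls⟩ := h
    subst hc
    rw [pvTokA, pvSplit,
        if_pos ⟨rfl, by rw [pv_contains_eq_class]; exact hcls⟩, ih]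
    by_cases hb : acc = [] <;>
      simp [hb, hcls, List.filter]
  | case2 acc c c2 rest h ih =>
    rw [pvTokA, pvSplit]
    have hn : ¬ (c = '?' ∧ pvPlaceholders.contains (String.ofList [c, c2]) = true) := by
      rintro ⟨rfl, hc⟩
      rw [pv_contains_eq_class] at hc
      exact h ⟨rfl, hc⟩
    rw [if_neg hn, if_neg h, ih]
  | case3 acc c =>
    rw [pvTokA, pvSplit, pvTokA]
    simp [List.filter]
  | case4 acc =>
    rw [pvTokA, pvSplit]
    by_cases hb : acc = [] <;>
      simp [hb, List.filter]

-- ===== VERDICT (by name: the statement is the Claim_ definition above) =====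
theorem tokenize_mask_py_spec : Claim_equal_tokenize_mask_py := by
  intro mask _
  unfold Spec_tokenize_mask_py tokenize_mask_py tokenize_mask_py_alt
  exact pv_tokA_eq_filter_split [] mask.toList
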